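-- pv_equiv track=rewrite | github.com/aditya697/Timetable_Generator | Algorithm/TeacherAllocation.py | generate_branch_batch
-- ===== SOURCE A (Python) =====
-- def generate_branch_batch(df_batch, branch_code):
--     branch_batch = {}
--     for batch in df_batch:
--         semester_branch = batch['semester'] + branch_code[batch['branch_name']]
--         branch = batch['branch_name']
--         if branch in branch_batch:
--             branch_batch[branch].append(semester_branch)
--         else:
--             branch_batch[branch] = [semester_branch]
--
--     for k, v in branch_batch.items():
--         branch_batch[k] = list(sorted(set(v)))
--     return branch_batch
-- ===== SOURCE B (Python) =====
-- def generate_branch_batch(df_batch, branch_code):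
--     pairs = [(b['branch_name'], b['semester'] + branch_code[b['branch_name']])
--              for b in df_batch]
--     order = []
--     for br, _ in pairs:
--         if br not in order:
--             order.append(br)
--     return {br: sorted({s for b2, s in pairs if b2 == br}) for br in order}
-- ===== Notes on version B (the rewrite author's own statement) =====
-- stated objective: alternative
-- what changed: Replaces A's incremental dict-of-lists built by in-place appends plus a second rewrite pass with a single flat (branch, semester_branch) pair list, a first-appearance key order list, and a per-branch filter/set/sort comprehension.
import Mathlib
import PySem

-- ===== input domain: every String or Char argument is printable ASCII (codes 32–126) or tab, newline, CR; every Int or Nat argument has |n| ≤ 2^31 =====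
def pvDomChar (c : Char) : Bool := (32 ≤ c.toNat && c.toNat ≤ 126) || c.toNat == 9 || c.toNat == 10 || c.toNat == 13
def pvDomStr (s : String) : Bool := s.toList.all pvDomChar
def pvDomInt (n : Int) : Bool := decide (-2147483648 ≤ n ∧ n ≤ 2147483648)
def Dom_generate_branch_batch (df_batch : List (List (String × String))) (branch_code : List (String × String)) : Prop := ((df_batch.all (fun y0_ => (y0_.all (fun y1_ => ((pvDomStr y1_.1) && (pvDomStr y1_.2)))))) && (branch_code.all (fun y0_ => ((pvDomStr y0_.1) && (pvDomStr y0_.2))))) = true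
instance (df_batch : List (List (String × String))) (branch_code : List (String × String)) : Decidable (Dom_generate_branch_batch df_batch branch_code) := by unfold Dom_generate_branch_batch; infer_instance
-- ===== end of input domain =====

-- B is an alternative decomposition (flat pair list + first-appearance order + per-branch filter/set/sort),
-- not claimed faster; equivalence is about the return value (A mutates no argument).

-- ===== PORT A =====
-- A: build dict branch -> list of semester_branch by in-place append, then rewrite each value to sorted(set(v)).
-- Lookups batch['semester'], batch['branch_name'], branch_code[...] are first-match assoc lookups; KeyError = none,
-- threaded through the fold (excluded by Pre_; the 'none => []' fallback is unreachable under Pre_).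
def generate_branch_batch (df_batch : List (List (String × String))) (branch_code : List (String × String)) : List (String × List String) :=
  match df_batch.foldl (fun acc batch =>
      match acc with
      | none => none
      | some branch_batch =>
        match PySem.Dict.get? (PySem.Dict.mk batch) "semester" with
        | none => none
        | some sem =>
          match PySem.Dict.get? (PySem.Dict.mk batch) "branch_name" with
          | none => none
          | some bn =>
            match PySem.Dict.get? (PySem.Dict.mk branch_code) bn with
            | none => none
            | some code =>
              let semester_branch := sem ++ code
              let branch := bn
              if branch_batch.contains branch then
                some (branch_batch.insert branch (branch_batch.getD branch [] ++ [semester_branch]))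
              else
                some (branch_batch.insert branch [semester_branch]))
    (some (PySem.Dict.empty : PySem.Dict String (List String))) with
  | none => []
  | some d =>
    (d.items.foldl (fun bb kv => bb.insert kv.1 (PySem.List.sorted (PySem.Set.ofList kv.2) (fun x => x) false)) d).items

-- ===== PORT B =====
-- B helper: the comprehension body, one (branch_name, semester+code) pair per batch (none = KeyError).
def pvPairB (branch_code : List (String × String)) (b : List (String × String)) : Option (String × String) :=
  (PySem.Dict.get? (PySem.Dict.mk b) "branch_name").bind (fun bn =>
    (PySem.Dict.get? (PySem.Dict.mk b) "semester").bind (fun sem =>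
      (PySem.Dict.get? (PySem.Dict.mk branch_code) bn).map (fun code => (bn, sem ++ code))))

def generate_branch_batch_alt (df_batch : List (List (String × String))) (branch_code : List (String × String)) : List (String × List String) :=
  match df_batch.mapM (pvPairB branch_code) with
  | none => []
  | some pairs =>
    let order := pairs.foldl (fun o p => if o.contains p.1 then o else o ++ [p.1]) ([] : List String)
    order.map (fun br => (br,
      PySem.List.sorted (PySem.Set.ofList ((pairs.filter (fun q => q.1 == br)).map (fun q => q.2))) (fun x => x) false))

-- ===== PRECONDITION & SPEC =====
-- Pre_ excludes exactly the inputs where Python A raises KeyError: some batch missing the 'semester' or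
-- 'branch_name' key, or its branch name absent from branch_code.
def Pre_generate_branch_batch (df_batch : List (List (String × String))) (branch_code : List (String × String)) : Prop :=
  ∀ batch ∈ df_batch,
    (PySem.Dict.get? (PySem.Dict.mk batch) "semester").isSome = true ∧
    ((PySem.Dict.get? (PySem.Dict.mk batch) "branch_name").bind
       (fun bn => PySem.Dict.get? (PySem.Dict.mk branch_code) bn)).isSome = true
instance (df_batch : List (List (String × String))) (branch_code : List (String × String)) : Decidable (Pre_generate_branch_batch df_batch branch_code) := by unfold Pre_generate_branch_batch; infer_instance

def pvWitness_generate_branch_batch : (List (List (String × String))) × (List (String × String)) :=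
  ([[("semester", "3"), ("branch_name", "CS")], [("semester", "1"), ("branch_name", "CS")]], [("CS", "A")])

def Spec_generate_branch_batch (df_batch : List (List (String × String))) (branch_code : List (String × String)) (out : List (String × List String)) : Prop := out = generate_branch_batch_alt df_batch branch_code
instance (df_batch : List (List (String × String))) (branch_code : List (String × String)) (out : List (String × List String)) : Decidable (Spec_generate_branch_batch df_batch branch_code out) := by unfold Spec_generate_branch_batch; infer_instance

-- ===== CLAIM (what is proved, stated in full; the proofs are below) =====
def Claim_equal_generate_branch_batch : Prop := ∀ (df_batch : List (List (String × String))) (branch_code : List (String × String)), Dom_generate_branch_batch df_batch branch_code → Pre_generate_branch_batch df_batch branch_code → Spec_generate_branch_batch df_batch branch_code (generate_branch_batch df_batch branch_code)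

-- ===== LEMMAS AND PROOFS =====

-- A's loop body is Dict.modify with default [].
lemma stepA_eq_modify (d : PySem.Dict String (List String)) (br s : String) :
    (if d.contains br then d.insert br (d.getD br [] ++ [s]) else d.insert br [s]) =
      d.modify br [] (fun v => v ++ [s]) := by
  by_cases h : d.contains br
  · simp [PySem.Dict.modify, h]
  · have hc : d.contains br = false := by simpa using h
    simp [PySem.Dict.modify, PySem.Dict.getD_of_not_contains d [] hc, hc]

-- Under Pre_, A's option-threaded first loop is the modify-fold over the pair list B extracts.
lemma foldA_eq (branch_code : List (String × String)) :
    ∀ (df : List (List (String × String))) (d : PySem.Dict String (List String)),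
      (∀ batch ∈ df, (pvPairB branch_code batch).isSome = true) →
      ∃ L, df.mapM (pvPairB branch_code) = some L ∧
        df.foldl (fun acc batch =>
          match acc with
          | none => none
          | some branch_batch =>
            match PySem.Dict.get? (PySem.Dict.mk batch) "semester" with
            | none => none
            | some sem =>
              match PySem.Dict.get? (PySem.Dict.mk batch) "branch_name" with
              | none => none
              | some bn =>
                match PySem.Dict.get? (PySem.Dict.mk branch_code) bn with
                | none => none
                | some code =>
                  let semester_branch := sem ++ code
                  let branch := bn
                  if branch_batch.contains branch then
                    some (branch_batch.insert branch (branch_batch.getD branch [] ++ [semester_branch]))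
                  else
                    some (branch_batch.insert branch [semester_branch])) (some d) =
          some (L.foldl (fun d p => d.modify p.1 [] (fun v => v ++ [p.2])) d) := by
  intro df
  induction df with
  | nil => intro d _; exact ⟨[], rfl, rfl⟩
  | cons b t ih =>
    intro d h
    have hb := h b (by simp)
    cases hbn : PySem.Dict.get? (PySem.Dict.mk b) "branch_name" with
    | none => simp [pvPairB, hbn] at hb
    | some bn =>
      cases hsem : PySem.Dict.get? (PySem.Dict.mk b) "semester" with
      | none => simp [pvPairB, hbn, hsem] at hb
      | some sem =>
        cases hcode : PySem.Dict.get? (PySem.Dict.mk branch_code) bn with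
        | none => simp [pvPairB, hbn, hsem, hcode] at hb
        | some code =>
          obtain ⟨L, hL, hfold⟩ := ih (d.modify bn [] (fun v => v ++ [sem ++ code]))
            (fun batch hm => h batch (by simp [hm]))
          refine ⟨(bn, sem ++ code) :: L, ?_, ?_⟩
          · simp [List.mapM_cons, pvPairB, hbn, hsem, hcode, hL]
          · simp only [List.foldl_cons, hsem, hbn, hcode]
            rw [← apply_ite some, stepA_eq_modify]
            exact hfold
-- value of a key untouched by the re-assignment loop
lemma foldl_insert_getD_not_mem (f : List String → List String) :
    ∀ (l : List (String × List String)) (d : PySem.Dict String (List String)) (k : String),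
      k ∉ l.map Prod.fst →
      (l.foldl (fun bb kv => bb.insert kv.1 (f kv.2)) d).getD k [] = d.getD k [] := by
  intro l
  induction l with
  | nil => intro d k _; rfl
  | cons p t ih =>
    intro d k hk
    simp only [List.map_cons, List.mem_cons, not_or] at hk
    simp only [List.foldl_cons]
    rw [ih _ _ hk.2, PySem.Dict.getD_insert_of_ne _ _ _ hk.1]

-- value of a key re-assigned exactly once by the second loop
lemma foldl_insert_getD_mem (f : List String → List String) :
    ∀ (l : List (String × List String)) (d : PySem.Dict String (List String)) (k : String) (v : List String),
      (k, v) ∈ l → (l.map Prod.fst).Nodup →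
      (l.foldl (fun bb kv => bb.insert kv.1 (f kv.2)) d).getD k [] = f v := by
  intro l
  induction l with
  | nil => intro d k v h _; simp at h
  | cons p t ih =>
    intro d k v hmem hnd
    simp only [List.map_cons, List.nodup_cons] at hnd
    rcases List.mem_cons.mp hmem with h | h
    · subst h
      simp only [List.foldl_cons]
      rw [foldl_insert_getD_not_mem f t _ _ hnd.1]
      simp [PySem.Dict.getD_insert_self]
    · simp only [List.foldl_cons]
      exact ih _ _ _ h hnd.2

-- adding only already-present elements leaves a set unchanged
lemma set_update_of_subset {s : PySem.Set String} :
    ∀ (l : List String), (∀ x ∈ l, x ∈ s) → PySem.Set.update s l = s := by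
  intro l
  induction l with
  | nil => intro _; rfl
  | cons x t ih =>
    intro h
    have hx : s.contains x = true := List.contains_iff_mem.mpr (h x (by simp))
    show PySem.Set.update (PySem.Set.add s x) t = s
    rw [show PySem.Set.add s x = s by rw [PySem.Set.add, if_pos hx]]
    exact ih (fun y hy => h y (by simp [hy]))

-- B's first-appearance order list is set(map fst)
lemma order_eq_ofList (L : List (String × String)) :
    L.foldl (fun o p => if o.contains p.1 then o else o ++ [p.1]) ([] : List String) =
      PySem.Set.ofList (L.map Prod.fst) := by
  rw [PySem.Set.ofList_eq_foldl, List.foldl_map]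
  rfl

-- the common grouping core: A's two dict loops produce exactly B's map over the order list
lemma core_eq (L : List (String × String)) :
    (((L.foldl (fun d p => d.modify p.1 [] (fun v => v ++ [p.2]))
        (PySem.Dict.empty : PySem.Dict String (List String))).items.foldl
        (fun bb kv => bb.insert kv.1 (PySem.List.sorted (PySem.Set.ofList kv.2) (fun x => x) false))
        (L.foldl (fun d p => d.modify p.1 [] (fun v => v ++ [p.2])) PySem.Dict.empty)).items) =
      (PySem.Set.ofList (L.map Prod.fst)).map (fun br => (br,
        PySem.List.sorted (PySem.Set.ofList ((L.filter (fun q => q.1 == br)).map (fun q => q.2))) (fun x => x) false)) := by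
  set G := L.foldl (fun d p => d.modify p.1 [] (fun v => v ++ [p.2])) (PySem.Dict.empty : PySem.Dict String (List String)) with hG
  have hkeysG : G.keys = PySem.Set.ofList (L.map Prod.fst) := by
    rw [hG, PySem.Dict.keys_foldl_modify_key L Prod.fst [] (fun _ p v => v ++ [p.2])]
    simp [PySem.Dict.keys_empty, PySem.Set.ofList_eq_foldl, PySem.Set.update]
  have hndG : G.keys.Nodup := by
    rw [hG]
    exact PySem.Dict.nodup_keys_foldl_modify_key L Prod.fst [] (fun _ p v => v ++ [p.2]) _
      PySem.Dict.nodup_keys_empty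
  have hgetG : ∀ c, G.getD c [] = (L.filter (fun q => q.1 == c)).map (fun q => q.2) := by
    intro c
    rw [hG, PySem.Dict.getD_foldl_modify_append L PySem.Dict.empty c]
    simp [PySem.Dict.getD_empty]
  set D2 := G.items.foldl
      (fun bb kv => bb.insert kv.1 (PySem.List.sorted (PySem.Set.ofList kv.2) (fun x => x) false)) G with hD2
  have hitemsG : G.items = G.keys.map (fun k => (k, G.getD k [])) :=
    PySem.Dict.items_eq_map_keys G hndG []
  have hndfst : (G.items.map Prod.fst).Nodup := hndG
  have hkeysD2 : D2.keys = G.keys := by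
    rw [hD2, PySem.Dict.keys_foldl_insert_key G.items Prod.fst
      (fun _ kv => PySem.List.sorted (PySem.Set.ofList kv.2) (fun x => x) false) G]
    exact set_update_of_subset _ (fun x hx => by
      simpa [PySem.Dict.keys] using hx)
  have hndD2 : D2.keys.Nodup := hkeysD2 ▸ hndG
  have hgetD2 : ∀ k, k ∈ G.keys →
      D2.getD k [] = PySem.List.sorted (PySem.Set.ofList (G.getD k [])) (fun x => x) false := by
    intro k hk
    have hmem : (k, G.getD k []) ∈ G.items := by
      rw [hitemsG]; exact List.mem_map.mpr ⟨k, hk, rfl⟩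
    rw [hD2]
    exact foldl_insert_getD_mem
      (fun v => PySem.List.sorted (PySem.Set.ofList v) (fun x => x) false)
      G.items G k (G.getD k []) hmem hndfst
  rw [PySem.Dict.items_eq_map_keys D2 hndD2 [], hkeysD2, ← hkeysG]
  exact List.map_congr_left (fun k hk => by rw [hgetD2 k hk, hgetG k])

-- ===== VERDICT (by name: the statement is the Claim_ definition above) =====
theorem generate_branch_batch_spec : Claim_equal_generate_branch_batch := by
  intro df_batch branch_code _ hpre
  have hsome : ∀ batch ∈ df_batch, (pvPairB branch_code batch).isSome = true := by
    intro batch hb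
    obtain ⟨h1, h2⟩ := hpre batch hb
    cases hbn : PySem.Dict.get? (PySem.Dict.mk batch) "branch_name" with
    | none => simp [hbn] at h2
    | some bn =>
      cases hsem : PySem.Dict.get? (PySem.Dict.mk batch) "semester" with
      | none => simp [hsem] at h1
      | some sem =>
        cases hcode : PySem.Dict.get? (PySem.Dict.mk branch_code) bn with
        | none => simp [hbn, hcode] at h2
        | some code => simp [pvPairB, hbn, hsem, hcode]
  obtain ⟨L, hL, hfold⟩ := foldA_eq branch_code df_batch PySem.Dict.empty hsome
  show generate_branch_batch df_batch branch_code = generate_branch_batch_alt df_batch branch_code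
  rw [generate_branch_batch, generate_branch_batch_alt, hfold, hL]
  simp only [order_eq_ofList]
  exact core_eq L
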